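-- pv_equiv track=rewrite | github.com/PINTO0309/onnx2tf | onnx2tf/tflite_builder/pytorch_accuracy_evaluator.py | _canonical_tensor_name
-- ===== SOURCE A (Python) =====
-- from typing import Any, Dict, List, Optional, Sequence, Tuple
--
-- def _canonical_tensor_name(name: str) -> str:
--     pieces: List[str] = []
--     prev_was_sep = False
--     for ch in str(name):
--         if ch.isalnum():
--             pieces.append(ch.lower())
--             prev_was_sep = False
--             continue
--         if not prev_was_sep:
--             pieces.append("_")
--             prev_was_sep = True
--     return "".join(pieces).strip("_")
-- ===== SOURCE B (Python) =====
-- def _canonical_tensor_name(name: str) -> str: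
--     s = str(name)
--     parts = []
--     i, n = 0, len(s)
--     while i < n:
--         k = s[i].isalnum()
--         j = i
--         while j < n and s[j].isalnum() == k:
--             j += 1
--         parts.append(s[i:j].lower() if k else "_")
--         i = j
--     return "".join(parts).strip("_")
-- ===== Notes on version B (the rewrite author's own statement) =====
-- stated objective: alternative
-- what changed: Replaces A's per-character loop with a prev_was_sep flag and a list of one-char pieces by a run-based groupby-style scan: each maximal run of same-isalnum-key characters is split off at once and emitted as a lowered run or a single underscore, then joined and stripped.
import Mathlib
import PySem

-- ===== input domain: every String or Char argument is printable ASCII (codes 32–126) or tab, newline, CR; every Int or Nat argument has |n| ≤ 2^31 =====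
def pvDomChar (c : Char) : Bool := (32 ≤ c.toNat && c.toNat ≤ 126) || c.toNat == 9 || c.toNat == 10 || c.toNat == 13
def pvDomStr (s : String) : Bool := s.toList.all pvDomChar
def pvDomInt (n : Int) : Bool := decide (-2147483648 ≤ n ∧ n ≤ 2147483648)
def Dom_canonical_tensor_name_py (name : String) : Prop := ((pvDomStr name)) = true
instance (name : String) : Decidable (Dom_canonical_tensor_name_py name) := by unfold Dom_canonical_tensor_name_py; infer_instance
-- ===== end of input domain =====

-- B replaces A's per-character prev_was_sep flag loop by a run-based (groupby-style) scan; objective: alternative decomposition, same cost.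

-- ===== PORT A =====
-- A's loop body: pieces collects 1-char strings, prev_was_sep is the flag
def pvStepA (st : List (List Char) × Bool) (ch : Char) : List (List Char) × Bool :=
  if PySem.Chars.isalnum ch then (st.1 ++ [[PySem.Chars.lowerChar ch]], false)
  else if !st.2 then (st.1 ++ [['_']], true)
  else st

def canonical_tensor_name_py (name : String) : String :=
  let r := name.toList.foldl pvStepA ([], false)
  String.ofList (PySem.Chars.stripChars (PySem.Chars.join [] r.1) ['_'])

-- ===== PORT B =====
-- Source B's outer while-loop: split off the maximal run s[i:j] of equal isalnum key, emit its part
def pvRunsB : List Char → List (List Char)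
  | [] => []
  | c :: cs =>
    let k := PySem.Chars.isalnum c
    let rest := cs.dropWhile (fun d => PySem.Chars.isalnum d == k)
    (if k then PySem.Chars.lower (c :: cs.takeWhile (fun d => PySem.Chars.isalnum d == k)) else ['_'])
      :: pvRunsB rest
termination_by cs => cs.length
decreasing_by exact Nat.lt_succ_of_le (cs.length_dropWhile_le _)

def canonical_tensor_name_py_alt (name : String) : String :=
  String.ofList (PySem.Chars.stripChars (PySem.Chars.join [] (pvRunsB name.toList)) ['_'])

-- ===== PRECONDITION & SPEC =====
def Spec_canonical_tensor_name_py (name : String) (out : String) : Prop := out = canonical_tensor_name_py_alt name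
instance (name : String) (out : String) : Decidable (Spec_canonical_tensor_name_py name out) := by unfold Spec_canonical_tensor_name_py; infer_instance

-- ===== CLAIM (what is proved, stated in full; the proofs are below) =====
def Claim_equal_canonical_tensor_name_py : Prop := ∀ (name : String), Dom_canonical_tensor_name_py name → Spec_canonical_tensor_name_py name (canonical_tensor_name_py name)

-- ===== LEMMAS AND PROOFS =====

-- the flattened character stream A's loop emits from state p on input cs
def pvA (p : Bool) : List Char → List Char
  | [] => []
  | c :: cs =>
    if PySem.Chars.isalnum c then PySem.Chars.lowerChar c :: pvA false cs
    else if p then pvA true cs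
    else '_' :: pvA true cs

theorem pvJoinNil (l : List (List Char)) : PySem.Chars.join [] l = l.flatten := by
  induction l with
  | nil => simp [PySem.Chars.join_nil]
  | cons a t ih =>
    cases t with
    | nil => simp [PySem.Chars.join_singleton]
    | cons b r => rw [PySem.Chars.join_cons_cons]; simp [ih]

theorem pvFoldA (cs : List Char) : ∀ pieces p,
    ((cs.foldl pvStepA (pieces, p)).1).flatten = pieces.flatten ++ pvA p cs := by
  induction cs with
  | nil => simp [pvA]
  | cons c cs ih =>
    intro pieces p
    by_cases h : PySem.Chars.isalnum c = true
    · simp [pvStepA, h, pvA, ih]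
    · cases p <;> simp [pvStepA, h, pvA, ih]

theorem pvSepRun (run : List Char) (rest : List Char)
    (h : ∀ d ∈ run, PySem.Chars.isalnum d = false) :
    pvA true (run ++ rest) = pvA true rest := by
  induction run with
  | nil => rfl
  | cons d run ih =>
    have hd := h d (by simp)
    simp only [List.cons_append, pvA, hd]
    exact ih (fun x hx => h x (by simp [hx]))

theorem pvAlnumRun (run : List Char) (rest : List Char)
    (h : ∀ d ∈ run, PySem.Chars.isalnum d = true) :
    pvA false (run ++ rest) = run.map PySem.Chars.lowerChar ++ pvA false rest := by
  induction run with
  | nil => rfl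
  | cons d run ih =>
    have hd := h d (by simp)
    simp only [List.cons_append, pvA, hd, if_true, List.map_cons, List.cons_append]
    rw [ih (fun x hx => h x (by simp [hx]))]

theorem pvMain (n : Nat) : ∀ cs : List Char, cs.length ≤ n →
    (pvRunsB cs).flatten = pvA false cs := by
  induction n with
  | zero =>
    intro cs h
    have : cs = [] := List.eq_nil_of_length_eq_zero (Nat.le_zero.mp h)
    subst this; simp [pvRunsB, pvA]
  | succ n ih =>
    intro cs hlen
    match cs with
    | [] => simp [pvRunsB, pvA]
    | c :: cs =>
      rw [pvRunsB]
      set k := PySem.Chars.isalnum c with hk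
      set tw := cs.takeWhile (fun d => PySem.Chars.isalnum d == k) with htw
      set dw := cs.dropWhile (fun d => PySem.Chars.isalnum d == k) with hdw
      have hsplit : cs = tw ++ dw := (cs.takeWhile_append_dropWhile).symm
      have htwmem : ∀ d ∈ tw, PySem.Chars.isalnum d = k := by
        intro d hd
        simpa using List.mem_takeWhile_imp hd
      have hdwlen : dw.length ≤ n := by
        have h1 : dw.length ≤ cs.length := by rw [hdw]; exact cs.length_dropWhile_le _
        have h2 : cs.length ≤ n := by simpa using Nat.le_of_succ_le_succ hlen
        omega
      have ihdw := ih dw hdwlen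
      by_cases hc : PySem.Chars.isalnum c = true
      · have hk' : k = true := by rw [hk, hc]
        rw [hsplit]
        simp only [hk', if_true, List.flatten_cons, PySem.Chars.lower, List.map_cons]
        have : pvA false (c :: (tw ++ dw)) =
            PySem.Chars.lowerChar c :: (tw.map PySem.Chars.lowerChar ++ pvA false dw) := by
          simp only [pvA, hc, if_true]
          rw [pvAlnumRun tw dw (fun d hd => by rw [htwmem d hd, hk'])]
        rw [this, ihdw]
        simp
      · have hc' : PySem.Chars.isalnum c = false := by simpa using hc
        have hk' : k = false := by rw [hk, hc']
        rw [hsplit]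
        simp only [hk', Bool.false_eq_true, if_false, List.flatten_cons]
        have hsep : pvA true (tw ++ dw) = pvA true dw :=
          pvSepRun tw dw (fun d hd => by rw [htwmem d hd, hk'])
        have hArun : pvA false (c :: (tw ++ dw)) = '_' :: pvA true dw := by
          simp only [pvA, hc', Bool.false_eq_true, if_false]
          rw [hsep]
        rw [hArun]
        have htd : pvA true dw = pvA false dw := by
          match hdweq : dw with
          | [] => rfl
          | d :: t =>
            have hdnot : (PySem.Chars.isalnum d == k) = false := by
              have := List.head?_dropWhile_not (fun d => PySem.Chars.isalnum d == k) cs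
              simpa [← hdw] using this
            have hd : PySem.Chars.isalnum d = true := by
              rw [hk'] at hdnot; simpa using hdnot
            simp only [pvA, hd, if_true]
        rw [htd, ihdw]
        rfl

-- ===== VERDICT (by name: the statement is the Claim_ definition above) =====
theorem canonical_tensor_name_py_spec : Claim_equal_canonical_tensor_name_py := by
  intro name _
  simp only [Spec_canonical_tensor_name_py, canonical_tensor_name_py, canonical_tensor_name_py_alt]
  rw [pvJoinNil, pvJoinNil, pvFoldA name.toList [] false,
      pvMain name.toList.length name.toList le_rfl]
  rfl
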